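-- pv_equiv track=rewrite | github.com/Checkmk/checkmk | cmk/base/legacy_checks/citrix_licenses.py | parse_citrix_licenses
-- ===== SOURCE A (Python) =====
-- def parse_citrix_licenses(string_table):
--     parsed = {}
--     for line in string_table:
--         try:
--             have = int(line[1])
--             used = int(line[2])
--         except (IndexError, ValueError):
--             continue
--         license_type = line[0]
--         licenses = parsed.setdefault(license_type, (0, 0))
--         parsed[license_type] = (licenses[0] + have, licenses[1] + used)
--     return parsed
-- ===== SOURCE B (Python) =====
-- def parse_citrix_licenses(string_table):
--     # Grouped two-pass: first collect the valid (type, have, used) triples,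
--     # then sum per license type over the distinct types in first-seen order.
--     triples = []
--     for line in string_table:
--         try:
--             triples.append((line[0], int(line[1]), int(line[2])))
--         except (IndexError, ValueError):
--             pass
--     order = list(dict.fromkeys(t for t, _, _ in triples))
--     return {
--         k: (
--             sum(h for t, h, _ in triples if t == k),
--             sum(u for t, _, u in triples if t == k),
--         )
--         for k in order
--     }
-- ===== Notes on version B (the rewrite author's own statement) =====
-- stated objective: alternative
-- what changed: Replaced A's single-pass dict accumulator (setdefault + in-place pairwise update per line) by a grouped two-pass: collect the valid (type, have, used) triples, then for each distinct license type in first-seen order sum the have and used columns.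
import Mathlib
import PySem

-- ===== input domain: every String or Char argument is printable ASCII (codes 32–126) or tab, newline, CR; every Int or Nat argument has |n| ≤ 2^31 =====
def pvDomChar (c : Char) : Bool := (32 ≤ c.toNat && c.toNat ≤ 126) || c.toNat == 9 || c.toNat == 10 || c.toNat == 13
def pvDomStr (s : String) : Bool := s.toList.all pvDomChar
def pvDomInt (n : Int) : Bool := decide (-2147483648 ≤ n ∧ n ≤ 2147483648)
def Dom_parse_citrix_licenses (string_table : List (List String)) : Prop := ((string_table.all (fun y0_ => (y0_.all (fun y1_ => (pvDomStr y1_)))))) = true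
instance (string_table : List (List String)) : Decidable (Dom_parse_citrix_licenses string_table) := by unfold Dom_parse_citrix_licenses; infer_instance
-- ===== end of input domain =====

-- B replaces A's incremental setdefault/update dict accumulator by a grouped two-pass
-- (collect valid triples, then sum per distinct license type); objective: alternative decomposition.

-- ===== PORT A =====
-- one iteration of A's loop: parse line[1], line[2] (skip on failure), then setdefault + in-place update
def pvStepA (d : PySem.Dict String (Int × Int)) (line : List String) : PySem.Dict String (Int × Int) :=
  match PySem.List.pyGet? line 1 with
  | none => d
  | some s1 =>
    match PySem.Int.ofStr? s1 with
    | none => d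
    | some hv =>
      match PySem.List.pyGet? line 2 with
      | none => d
      | some s2 =>
        match PySem.Int.ofStr? s2 with
        | none => d
        | some us =>
          match PySem.List.pyGet? line 0 with
          | none => d  -- unreachable: line[1] and line[2] exist, so line[0] does
          | some lt =>
            let d' := d.setdefault lt (0, 0)
            let licenses := d'.getD lt (0, 0)
            d'.insert lt (licenses.1 + hv, licenses.2 + us)

def parse_citrix_licenses (string_table : List (List String)) : List (String × Int × Int) :=
  (string_table.foldl pvStepA PySem.Dict.empty).items

-- ===== PORT B =====
-- (line[0], int(line[1]), int(line[2])) if no IndexError/ValueError, else None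
def pvParse? (line : List String) : Option (String × Int × Int) :=
  match PySem.List.pyGet? line 0 with
  | none => none
  | some s0 =>
    match PySem.List.pyGet? line 1 with
    | none => none
    | some s1 =>
      match PySem.Int.ofStr? s1 with
      | none => none
      | some hv =>
        match PySem.List.pyGet? line 2 with
        | none => none
        | some s2 =>
          match PySem.Int.ofStr? s2 with
          | none => none
          | some us => some (s0, hv, us)

-- (sum(h for t,h,_ in triples if t == k), sum(u for t,_,u in triples if t == k))
def pvSums (triples : List (String × Int × Int)) (k : String) : Int × Int :=
  (((triples.filter (fun t => t.1 == k)).map (fun t => t.2.1)).sum,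
   ((triples.filter (fun t => t.1 == k)).map (fun t => t.2.2)).sum)

def parse_citrix_licenses_alt (string_table : List (List String)) : List (String × Int × Int) :=
  let triples := string_table.foldl (fun acc line =>
    match pvParse? line with
    | some t => acc ++ [t]
    | none => acc) []
  let order := PySem.List.dedup (triples.map (fun t => t.1))
  order.map (fun k => (k, pvSums triples k))

-- ===== PRECONDITION & SPEC =====
def Spec_parse_citrix_licenses (string_table : List (List String)) (out : List (String × Int × Int)) : Prop := out = parse_citrix_licenses_alt string_table
instance (string_table : List (List String)) (out : List (String × Int × Int)) : Decidable (Spec_parse_citrix_licenses string_table out) := by unfold Spec_parse_citrix_licenses; infer_instance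

-- ===== CLAIM (what is proved, stated in full; the proofs are below) =====
def Claim_equal_parse_citrix_licenses : Prop := ∀ (string_table : List (List String)), Dom_parse_citrix_licenses string_table → Spec_parse_citrix_licenses string_table (parse_citrix_licenses string_table)

-- ===== LEMMAS AND PROOFS =====

-- A's loop body, rephrased on an already-parsed triple
def pvApplyT (d : PySem.Dict String (Int × Int)) (t : String × Int × Int) : PySem.Dict String (Int × Int) :=
  let d' := d.setdefault t.1 (0, 0)
  let licenses := d'.getD t.1 (0, 0)
  d'.insert t.1 (licenses.1 + t.2.1, licenses.2 + t.2.2)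

lemma pvStepA_eq (d : PySem.Dict String (Int × Int)) (line : List String) :
    pvStepA d line = match pvParse? line with | none => d | some t => pvApplyT d t := by
  cases line with
  | nil => simp [pvStepA, pvParse?, PySem.List.pyGet?, PySem.List.pyIdx?]
  | cons a l =>
    unfold pvStepA pvParse?
    rw [PySem.List.pyGet?_zero_cons]
    cases h1 : PySem.List.pyGet? (a :: l) 1 with
    | none => simp
    | some s1 =>
      cases h2 : PySem.Int.ofStr? s1 with
      | none => simp [h2]
      | some hv =>
        cases h3 : PySem.List.pyGet? (a :: l) 2 with
        | none => simp [h2]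
        | some s2 =>
          cases h4 : PySem.Int.ofStr? s2 with
          | none => simp [h2, h4]
          | some us => simp [h2, h4, pvApplyT]

lemma pvTriples_fold (tbl : List (List String)) (acc : List (String × Int × Int)) :
    tbl.foldl (fun acc line =>
      match pvParse? line with
      | some t => acc ++ [t]
      | none => acc) acc = acc ++ tbl.filterMap pvParse? := by
  induction tbl generalizing acc with
  | nil => simp
  | cons line tl ih =>
    cases h : pvParse? line with
    | none => simp [List.foldl_cons, h, ih]
    | some t => simp [List.foldl_cons, h, ih]

lemma pvFoldA_eq (tbl : List (List String)) (d : PySem.Dict String (Int × Int)) :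
    tbl.foldl pvStepA d = (tbl.filterMap pvParse?).foldl pvApplyT d := by
  induction tbl generalizing d with
  | nil => rfl
  | cons line tl ih =>
    rw [List.foldl_cons, List.filterMap_cons, pvStepA_eq]
    cases h : pvParse? line with
    | none => simp [ih]
    | some t => simp [ih]

lemma pvSums_nil (k : String) : pvSums [] k = (0, 0) := rfl

lemma pvSums_cons (t : String × Int × Int) (ts : List (String × Int × Int)) (k : String) :
    pvSums (t :: ts) k =
      if t.1 == k then (t.2.1 + (pvSums ts k).1, t.2.2 + (pvSums ts k).2) else pvSums ts k := by
  by_cases h : t.1 = k <;> simp [pvSums, h]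

lemma pvNodup_applyT (d : PySem.Dict String (Int × Int)) (t : String × Int × Int)
    (h : d.keys.Nodup) : (pvApplyT d t).keys.Nodup := by
  unfold pvApplyT
  by_cases hc : d.contains t.1 = true
  · rw [PySem.Dict.setdefault_of_contains _ _ hc]
    exact PySem.Dict.nodup_keys_insert _ _ _ h
  · rw [PySem.Dict.setdefault_of_not_contains _ _ (by simpa using hc)]
    exact PySem.Dict.nodup_keys_insert _ _ _ (PySem.Dict.nodup_keys_insert _ _ _ h)

lemma pvFold_nf (ts : List (String × Int × Int)) (d : PySem.Dict String (Int × Int))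
    (h : d.keys.Nodup) :
    (ts.foldl pvApplyT d).items =
      d.items.map (fun p => (p.1, p.2.1 + (pvSums ts p.1).1, p.2.2 + (pvSums ts p.1).2))
      ++ ((PySem.List.dedup (ts.map (fun t => t.1))).filter
            (fun k => !d.contains k)).map (fun k => (k, pvSums ts k)) := by
  induction ts generalizing d with
  | nil => simp [pvSums_nil]
  | cons t ts ih =>
    obtain ⟨k, hv, us⟩ := t
    rw [List.foldl_cons, ih _ (pvNodup_applyT d (k, hv, us) h)]
    have hdedup : PySem.List.dedup (((k, hv, us) :: ts).map (fun t => t.1))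
        = k :: (PySem.List.dedup (ts.map (fun t => t.1))).filter (fun y => !y == k) := by
      simp [List.map_cons, PySem.List.dedup_eq_ofList, PySem.Set.ofList_cons, PySem.Set.discard]
    by_cases hc : d.contains k = true
    · have happ : pvApplyT d (k, hv, us)
          = d.insert k ((d.getD k (0,0)).1 + hv, (d.getD k (0,0)).2 + us) := by
        simp [pvApplyT, PySem.Dict.setdefault_of_contains _ _ hc]
      rw [happ, PySem.Dict.items_insert_of_contains _ _ hc, List.map_map, hdedup,
        List.filter_cons_of_neg (by simp [hc]), List.filter_filter]
      congr 1
      · -- old entries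
        apply List.map_congr_left
        intro p hp
        by_cases hpk : p.1 = k
        · have hmem : (k, p.2) ∈ d.items := by rw [← hpk]; exact hp
          have hget := PySem.Dict.getD_of_mem_items _ hmem h (0, 0)
          simp [Function.comp, hpk, hget, pvSums_cons]
          constructor <;> ring
        · have hkp : ¬ k = p.1 := fun hh => hpk hh.symm
          simp [Function.comp, hkp, pvSums_cons, show (p.1 == k) = false by simpa using hpk]
      · -- new keys
        have hfil : List.filter
            (fun k' => !(d.insert k ((d.getD k (0,0)).1 + hv, (d.getD k (0,0)).2 + us)).contains k')
            (PySem.List.dedup (List.map (fun t => t.1) ts))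
            = List.filter (fun a => (!d.contains a) && (!(a == k)))
                (PySem.List.dedup (List.map (fun t => t.1) ts)) := by
          apply List.filter_congr
          intro x _
          cases hxk : x == k <;> simp [PySem.Dict.contains_insert, hxk]
        rw [hfil]
        apply List.map_congr_left
        intro x hx
        have hxk : (k == x) = false := by
          have := List.of_mem_filter hx
          simp at this
          simpa using fun hh => this.right hh.symm
        simp [pvSums_cons, hxk]
    · have hcf : d.contains k = false := by simpa using hc
      have hknotmem : ∀ p ∈ d.items, ¬ p.1 = k := by
        intro p hp hpk
        have : d.contains k = true :=
          (PySem.Dict.contains_iff_mem_keys d k).mpr (List.mem_map.mpr ⟨p, hp, hpk⟩)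
        simp [this] at hcf
      have happ : pvApplyT d (k, hv, us)
          = (d.insert k (0,0)).insert k ((0:Int) + hv, (0:Int) + us) := by
        simp [pvApplyT, PySem.Dict.setdefault_of_not_contains _ _ hcf, PySem.Dict.getD_insert_self]
      rw [happ, PySem.Dict.insert_insert_self, PySem.Dict.items_insert_of_not_contains _ _ hcf,
        hdedup, List.map_append, List.filter_cons_of_pos (by simp [hcf]), List.filter_filter,
        List.append_assoc]
      congr 1
      · -- old entries
        apply List.map_congr_left
        intro p hp
        have hpk := hknotmem p hp
        have hkp : ¬ k = p.1 := fun hh => hpk hh.symm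
        simp [hkp, pvSums_cons]
      · -- the fresh key followed by the remaining new keys
        rw [List.map_cons]
        simp only [List.map_cons, List.map_nil, List.singleton_append]
        congr 1
        · simp [pvSums_cons]
        · have hfil : List.filter
              (fun k' => !(d.insert k ((0:Int) + hv, (0:Int) + us)).contains k')
              (PySem.List.dedup (List.map (fun t => t.1) ts))
              = List.filter (fun a => (!d.contains a) && (!(a == k)))
                  (PySem.List.dedup (List.map (fun t => t.1) ts)) := by
            apply List.filter_congr
            intro x _
            cases hxk : x == k <;> simp [PySem.Dict.contains_insert, hxk]
          rw [hfil]
          apply List.map_congr_left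
          intro x hx
          have hxk : (k == x) = false := by
            have := List.of_mem_filter hx
            simp at this
            simpa using fun hh => this.right hh.symm
          simp [pvSums_cons, hxk]

-- ===== VERDICT (by name: the statement is the Claim_ definition above) =====
theorem parse_citrix_licenses_spec : Claim_equal_parse_citrix_licenses := by
  intro tbl _
  unfold Spec_parse_citrix_licenses parse_citrix_licenses parse_citrix_licenses_alt
  rw [pvTriples_fold tbl [], List.nil_append, pvFoldA_eq,
    pvFold_nf _ _ PySem.Dict.nodup_keys_empty]
  simp [PySem.Dict.empty]
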